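-- pv_equiv track=rewrite | github.com/ryanmogauro/Scheduling-Project | scheduleGenerator.py | getAvailabilityDict
-- ===== SOURCE A (Python) =====
-- def getUnavailability(employee):
--     #something like Unavailability.where(employeeID = id).all()
--     dummy = {
--
--
--         'Ryan' :  [
--             [[7.5, 11], [13, 17]],
--             [[11,13]],
--             [[7,9], [16, 17]],
--             [[7,8], [1,3]],
--             [[7,10], [13, 15]],
--             [[]],
--             [[7, 11]]
--             ],
--         'Eli' : [
--             [[13, 17]],
--             [[9, 10], [11,13]],
--             [[7,9]],
--             [],
--             [[10, 12]],
--             [[]],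
--             [[7, 15]]
--             ],
--         'Henry' : [
--             [[10, 11.5]],
--             [[11,16.5]],
--             [[9, 12], [13, 17]],
--             [[11, 15]],
--             [[12, 14.5]],
--             [[]],
--             [[14, 15]]
--             ],
--         'Trey' : [
--             [[12.5, 15.5]],
--             [[7, 9.5]],
--             [[]],
--             [[11, 15]],
--             [[]],
--             [[]],
--             [[]]
--             ]
--     }
--
--     return dummy[employee]
--
-- def getAvailabilityDict(employees):
--     availability = {}
--     for id in employees:
--
--         #48 time slots in a day, for 7 days
--         #1 -> available, 0 -> unavailable
--         employeeAvailability = [[1 for i in range(48)] for j in range(7)]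
--
--
--         unavailability = getUnavailability(id)
--
--
--         for dayIndex, dayUnvailability in enumerate(unavailability):
--             for block in dayUnvailability:
--                 #if employee free all day
--                 if not block:
--                     pass
--
--                 start = int(block[0]) if block else 0
--                 end = int(block[1]) if block else 0
--
--                 for shift in range(start, end):
--                     employeeAvailability[dayIndex][shift] = 0
--
--
--
--
--         availability[id] = employeeAvailability
--
--     return availability
-- ===== SOURCE B (Python) =====
-- def getUnavailability(employee):
--     dummy = {
--         'Ryan': [
--             [[7.5, 11], [13, 17]],
--             [[11, 13]],
--             [[7, 9], [16, 17]],
--             [[7, 8], [1, 3]],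
--             [[7, 10], [13, 15]],
--             [[]],
--             [[7, 11]]
--         ],
--         'Eli': [
--             [[13, 17]],
--             [[9, 10], [11, 13]],
--             [[7, 9]],
--             [],
--             [[10, 12]],
--             [[]],
--             [[7, 15]]
--         ],
--         'Henry': [
--             [[10, 11.5]],
--             [[11, 16.5]],
--             [[9, 12], [13, 17]],
--             [[11, 15]],
--             [[12, 14.5]],
--             [[]],
--             [[14, 15]]
--         ],
--         'Trey': [
--             [[12.5, 15.5]],
--             [[7, 9.5]],
--             [[]],
--             [[11, 15]],
--             [[]],
--             [[]],
--             [[]]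
--         ]
--     }
--     return dummy[employee]
--
--
-- def getAvailabilityDict(employees):
--     # build each 48-slot row directly with a per-slot predicate instead of
--     # pre-filling 1s and overwriting 0s block by block
--     return {
--         e: [[0 if any(b and int(b[0]) <= i < int(b[1]) for b in day) else 1
--              for i in range(48)]
--             for day in getUnavailability(e)]
--         for e in employees
--     }
-- ===== Notes on version B (the rewrite author's own statement) =====
-- stated objective: idiomatic
-- what changed: B builds each 48-slot day row directly with a per-slot any-interval-contains-it predicate (a dict/list comprehension) instead of A's pre-filling a 7x48 grid of 1s and then mutating slots to 0 block by block.
import Mathlib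
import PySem

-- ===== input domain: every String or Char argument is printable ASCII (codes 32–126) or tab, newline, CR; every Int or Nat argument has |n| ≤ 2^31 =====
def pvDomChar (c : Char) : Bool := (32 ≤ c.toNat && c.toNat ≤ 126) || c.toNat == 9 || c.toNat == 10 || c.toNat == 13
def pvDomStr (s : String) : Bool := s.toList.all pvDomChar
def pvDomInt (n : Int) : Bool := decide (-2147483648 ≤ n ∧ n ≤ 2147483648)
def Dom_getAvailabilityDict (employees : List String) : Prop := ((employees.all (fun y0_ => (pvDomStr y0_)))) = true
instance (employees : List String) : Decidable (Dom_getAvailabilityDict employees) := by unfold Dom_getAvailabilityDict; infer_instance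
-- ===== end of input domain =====

-- B builds each 48-slot day row with a per-slot interval-membership predicate instead of
-- A's fill-with-1s-then-overwrite-0s mutation; same values, more idiomatic (no speed claim).


-- ===== PORT A =====
-- the module's hard-coded table, with every numeric entry stored DOUBLED: the Python
-- numbers are all exact half-integers (7.5, 11, 16.5, ...), so 2*x is an exact Int
-- encoding; Python's int(x) on these non-negative values is then floordiv (2x) 2.
def dummyTable : List (String × List (List (List Int))) :=
  [("Ryan",  [[[15, 22], [26, 34]], [[22, 26]], [[14, 18], [32, 34]], [[14, 16], [2, 6]],
              [[14, 20], [26, 30]], [[]], [[14, 22]]]),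
   ("Eli",   [[[26, 34]], [[18, 20], [22, 26]], [[14, 18]], [],
              [[20, 24]], [[]], [[14, 30]]]),
   ("Henry", [[[20, 23]], [[22, 33]], [[18, 24], [26, 34]], [[22, 30]],
              [[24, 29]], [[]], [[28, 30]]]),
   ("Trey",  [[[25, 31]], [[14, 19]], [[]], [[22, 30]],
              [[]], [[]], [[]]])]

-- dummy[employee]; Python raises KeyError for an unknown name — Pre_ excludes those inputs,
-- so the [] default is never reached under the claim
def getUnavailabilityP (employee : String) : List (List (List Int)) :=
  PySem.Dict.getD (PySem.Dict.ofList dummyTable) employee []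

-- the body of A's outer loop: fill a 7x48 grid of 1s, then write 0 over each block's slots.
-- int(x) on the table's non-negative half-integer values is floordiv (2x) 2 under the
-- doubled encoding; the written indices in the fixed
-- table are non-negative and in range, so pySetD is exact here; enumerate indices start
-- at 0, so p.1.toNat is exact.
def buildGridA (id : String) : List (List Int) :=
  let employeeAvailability := List.replicate 7 (List.replicate 48 (1 : Int))
  let unavailability := getUnavailabilityP id
  (PySem.List.enumerate unavailability).foldl (fun av p =>
    p.2.foldl (fun av2 block =>
      let start : Int := if block ≠ [] then PySem.Int.floordiv (block.getD 0 0) 2 else 0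
      let stop  : Int := if block ≠ [] then PySem.Int.floordiv (block.getD 1 0) 2 else 0
      (PySem.List.pyRange start stop 1).foldl (fun av3 s =>
        av3.modify p.1.toNat (fun row => PySem.List.pySetD row s (0 : Int))) av2) av) employeeAvailability

def getAvailabilityDict (employees : List String) : List (String × List (List Int)) :=
  (employees.foldl (fun availability id => availability.insert id (buildGridA id))
    (PySem.Dict.empty : PySem.Dict String (List (List Int)))).items

-- ===== PORT B =====
-- B's grid: each of the day's 48 slots is 0 iff some non-empty block's interval contains it
def buildGridB (e : String) : List (List Int) :=
  (getUnavailabilityP e).map (fun day =>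
    (List.range 48).map (fun i =>
      if day.any (fun b =>
          !b.isEmpty && decide (PySem.Int.floordiv (b.getD 0 0) 2 ≤ (i : Int)) &&
          decide ((i : Int) < PySem.Int.floordiv (b.getD 1 0) 2))
      then (0 : Int) else 1))

def getAvailabilityDict_alt (employees : List String) : List (String × List (List Int)) :=
  (employees.foldl (fun d e => d.insert e (buildGridB e))
    (PySem.Dict.empty : PySem.Dict String (List (List Int)))).items

-- ===== PRECONDITION & SPEC =====
-- Pre_ excludes exactly the inputs on which A raises: any employee name absent from the
-- hard-coded dummy table (KeyError); B raises there too.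
def Pre_getAvailabilityDict (employees : List String) : Prop :=
  ∀ e ∈ employees, e = "Ryan" ∨ e = "Eli" ∨ e = "Henry" ∨ e = "Trey"
instance (employees : List String) : Decidable (Pre_getAvailabilityDict employees) := by
  unfold Pre_getAvailabilityDict; infer_instance

def pvWitness_getAvailabilityDict : List String := ["Ryan", "Trey"]

def Spec_getAvailabilityDict (employees : List String) (out : List (String × List (List Int))) : Prop := out = getAvailabilityDict_alt employees
instance (employees : List String) (out : List (String × List (List Int))) : Decidable (Spec_getAvailabilityDict employees out) := by unfold Spec_getAvailabilityDict; infer_instance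

-- ===== CLAIM (what is proved, stated in full; the proofs are below) =====
def Claim_equal_getAvailabilityDict : Prop := ∀ (employees : List String), Dom_getAvailabilityDict employees → Pre_getAvailabilityDict employees → Spec_getAvailabilityDict employees (getAvailabilityDict employees)

-- ===== LEMMAS AND PROOFS =====

-- on each of the four table names the two grid constructions agree (checked by computation)
theorem grid_eq (e : String)
    (h : e = "Ryan" ∨ e = "Eli" ∨ e = "Henry" ∨ e = "Trey") :
    buildGridA e = buildGridB e := by
  rcases h with h | h | h | h <;> subst h <;> decide

theorem fold_eq (l : List String) (d : PySem.Dict String (List (List Int)))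
    (h : ∀ e ∈ l, e = "Ryan" ∨ e = "Eli" ∨ e = "Henry" ∨ e = "Trey") :
    l.foldl (fun availability id => availability.insert id (buildGridA id)) d
      = l.foldl (fun d e => d.insert e (buildGridB e)) d := by
  induction l generalizing d with
  | nil => rfl
  | cons x xs ih =>
      simp only [List.foldl_cons]
      rw [grid_eq x (h x (List.mem_cons_self))]
      exact ih _ (fun e he => h e (List.mem_cons_of_mem _ he))

-- ===== VERDICT (by name: the statement is the Claim_ definition above) =====
theorem getAvailabilityDict_spec : Claim_equal_getAvailabilityDict := by
  intro employees _ hpre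
  unfold Spec_getAvailabilityDict getAvailabilityDict getAvailabilityDict_alt
  rw [fold_eq employees _ hpre]
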